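-- pv_equiv track=rewrite | github.com/leederrick1/edit_distance | edit_distance.py | get_back
-- ===== SOURCE A (Python) =====
-- def get_back(rows, cols):
--     matrix = []
--     for i in range(len(rows)+1):
--         sub = []
--         for j in range(len(cols)+1):
--             sub.append('0')
--         matrix.append(sub)
--     for j in range(1,len(cols)+1):
--         matrix[0][j] = 'l'
--     for i in range(1,len(rows)+1):
--         matrix[i][0] = "u"
--     matrix[0][0] = "finish"
--     return matrix
-- ===== SOURCE B (Python) =====
-- def get_back(rows, cols):
--     # Build the table column-wise, then transpose: column 0 carries the
--     # 'finish'/'u' markers, every other column is 'l' followed by '0's.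
--     first_col = ['finish'] + ['u'] * len(rows)
--     other_cols = [['l'] + ['0'] * len(rows) for _ in cols]
--     return [list(t) for t in zip(first_col, *other_cols)]
-- ===== Notes on version B (the rewrite author's own statement) =====
-- stated objective: alternative
-- what changed: B builds the table column-wise (first column ['finish']+['u']*n, other columns ['l']+['0']*n) and transposes it with zip, instead of A's fill-everything-with-'0' matrix followed by three border-overwrite passes.
import Mathlib
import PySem

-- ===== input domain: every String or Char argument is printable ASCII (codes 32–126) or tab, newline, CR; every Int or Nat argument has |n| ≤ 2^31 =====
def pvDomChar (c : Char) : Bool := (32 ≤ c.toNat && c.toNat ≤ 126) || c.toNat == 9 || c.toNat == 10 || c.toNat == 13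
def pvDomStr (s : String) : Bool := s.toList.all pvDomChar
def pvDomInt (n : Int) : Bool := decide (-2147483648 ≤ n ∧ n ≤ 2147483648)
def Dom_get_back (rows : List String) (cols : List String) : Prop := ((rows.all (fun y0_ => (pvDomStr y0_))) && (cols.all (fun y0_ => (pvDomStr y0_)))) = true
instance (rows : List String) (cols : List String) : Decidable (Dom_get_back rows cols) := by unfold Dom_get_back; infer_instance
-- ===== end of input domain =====

-- B builds the table column-wise (first column 'finish'/'u', other columns 'l'/'0')
-- and transposes with zip, instead of A's fill-with-'0' then three border-overwrite passes.

-- ===== PORT A =====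
def get_back (rows : List String) (cols : List String) : List (List String) :=
  let matrix : List (List String) :=
    (PySem.List.pyRange 0 ((rows.length : Int) + 1) 1).foldl (fun m _ =>
      m ++ [(PySem.List.pyRange 0 ((cols.length : Int) + 1) 1).foldl
              (fun s _ => s ++ ["0"]) ([] : List String)]) []
  let matrix :=
    (PySem.List.pyRange 1 ((cols.length : Int) + 1) 1).foldl (fun m j =>
      PySem.List.pySetD m 0 (PySem.List.pySetD (PySem.List.pyGetD m 0 []) j "l")) matrix
  let matrix :=
    (PySem.List.pyRange 1 ((rows.length : Int) + 1) 1).foldl (fun m i =>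
      PySem.List.pySetD m i (PySem.List.pySetD (PySem.List.pyGetD m i []) 0 "u")) matrix
  PySem.List.pySetD matrix 0 (PySem.List.pySetD (PySem.List.pyGetD matrix 0 []) 0 "finish")

-- ===== PORT B =====
-- zip(first, *cols) of Python: stops as soon as any iterator is exhausted;
-- each tuple (then list(t)) becomes first's element consed onto the columns' heads.
def pyZipStar (first : List String) (cs : List (List String)) : List (List String) :=
  match first with
  | [] => []
  | x :: xt =>
      if cs.all (fun c => !c.isEmpty) then
        (x :: cs.map (fun c => c.headD "")) :: pyZipStar xt (cs.map List.tail)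
      else []

def get_back_alt (rows : List String) (cols : List String) : List (List String) :=
  let first_col : List String := "finish" :: List.replicate rows.length "u"
  let other_cols : List (List String) :=
    cols.map (fun _ => "l" :: List.replicate rows.length "0")
  pyZipStar first_col other_cols

-- ===== PRECONDITION & SPEC =====
def Spec_get_back (rows : List String) (cols : List String) (out : List (List String)) : Prop := out = get_back_alt rows cols
instance (rows : List String) (cols : List String) (out : List (List String)) : Decidable (Spec_get_back rows cols out) := by unfold Spec_get_back; infer_instance

-- ===== CLAIM (what is proved, stated in full; the proofs are below) =====
def Claim_equal_get_back : Prop := ∀ (rows : List String) (cols : List String), Dom_get_back rows cols → Spec_get_back rows cols (get_back rows cols)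

-- ===== LEMMAS AND PROOFS =====

-- appending a constant element once per step = appending a replicate
theorem foldl_append_const {α β : Type} (x : α) (l : List β) (init : List α) :
    l.foldl (fun s _ => s ++ [x]) init = init ++ List.replicate l.length x := by
  induction l generalizing init with
  | nil => simp
  | cons b tl ih =>
      simp only [List.foldl_cons, List.length_cons, ih, List.replicate_succ]
      simp [List.append_assoc]

-- phase 2 of A only rewrites row 0
theorem foldl_set_head (l : List Int) (r : List String) (rest : List (List String)) :
    l.foldl (fun m j =>
        PySem.List.pySetD m 0 (PySem.List.pySetD (PySem.List.pyGetD m 0 []) j "l"))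
      (r :: rest)
    = (l.foldl (fun r j => PySem.List.pySetD r j "l") r) :: rest := by
  induction l generalizing r with
  | nil => rfl
  | cons j tl ih =>
      simp only [List.foldl_cons]
      rw [show PySem.List.pyGetD (r :: rest) 0 [] = r by
            simp [PySem.List.pyGetD, PySem.List.pyGet?, PySem.List.pyIdx?],
          show ∀ x, PySem.List.pySetD (r :: rest) 0 x = x :: rest by
            intro x; simp [PySem.List.pySetD, PySem.List.pySet?, PySem.List.pyIdx?]]
      exact ih _

-- filling positions 1..m of row 0 with "l"
theorem fill_row (m : Nat) (t : List String) :
    (PySem.List.pyRange 1 ((m : Int) + 1) 1).foldl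
        (fun r j => PySem.List.pySetD r j "l")
        ("0" :: (List.replicate m "0" ++ t))
    = "0" :: (List.replicate m "l" ++ t) := by
  induction m generalizing t with
  | zero => rw [PySem.List.pyRange_one_eq_nil (by norm_num)]; rfl
  | succ m ih =>
      push_cast
      rw [PySem.List.pyRange_one_succ_right (show (1 : Int) ≤ (m : Int) + 1 by omega),
          List.foldl_append]
      rw [show ("0" : String) :: (List.replicate (m + 1) "0" ++ t)
            = "0" :: (List.replicate m "0" ++ ("0" :: t)) by
          simp [List.replicate_succ', List.append_assoc]]
      rw [ih ("0" :: t)]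
      simp only [List.foldl_cons, List.foldl_nil]
      rw [show ((m : Int) + 1) = ((m + 1 : Nat) : Int) by push_cast; ring]
      simp only [PySem.List.pySetD_natCast]
      rw [List.set_cons_succ]
      rw [List.set_append_right _ _ (by simp)]
      simp [List.replicate_succ', List.append_assoc]

-- phase 3 of A: rows 1..n each get "u" in column 0
theorem fill_col (n : Nat) (h r : List String) (t : List (List String)) :
    (PySem.List.pyRange 1 ((n : Int) + 1) 1).foldl
        (fun m i =>
          PySem.List.pySetD m i (PySem.List.pySetD (PySem.List.pyGetD m i []) 0 "u"))
        (h :: (List.replicate n r ++ t))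
    = h :: (List.replicate n (PySem.List.pySetD r 0 "u") ++ t) := by
  induction n generalizing t with
  | zero => rw [PySem.List.pyRange_one_eq_nil (by norm_num)]; rfl
  | succ n ih =>
      push_cast
      rw [PySem.List.pyRange_one_succ_right (show (1 : Int) ≤ (n : Int) + 1 by omega),
          List.foldl_append]
      rw [show h :: (List.replicate (n + 1) r ++ t)
            = h :: (List.replicate n r ++ (r :: t)) by
          simp [List.replicate_succ', List.append_assoc]]
      rw [ih (r :: t)]
      simp only [List.foldl_cons, List.foldl_nil]
      have hget : PySem.List.pyGetD
          (h :: (List.replicate n (PySem.List.pySetD r 0 "u") ++ (r :: t))) ((n : Int) + 1) []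
          = r := by
        rw [show ((n : Int) + 1) = ((n + 1 : Nat) : Int) by push_cast; ring,
            PySem.List.pyGetD_natCast]
        simp [List.getD]
      rw [hget]
      rw [show ((n : Int) + 1) = ((n + 1 : Nat) : Int) by push_cast; ring]
      simp only [PySem.List.pySetD_natCast]
      rw [List.set_cons_succ]
      rw [List.set_append_right _ _ (by simp)]
      simp [List.replicate_succ', List.append_assoc]

-- closed form of port A
theorem get_back_closed (rows cols : List String) :
    get_back rows cols
    = ("finish" :: List.replicate cols.length "l")
        :: List.replicate rows.length ("u" :: List.replicate cols.length "0") := by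
  have hrow : (PySem.List.pyRange 0 ((cols.length : Int) + 1) 1).foldl
      (fun s _ => s ++ ["0"]) ([] : List String)
      = List.replicate (cols.length + 1) "0" := by
    rw [foldl_append_const]
    rw [PySem.List.length_pyRange_one]
    rw [show (((cols.length : Int) + 1) - 0).toNat = cols.length + 1 by omega]
    simp
  have hmat : (PySem.List.pyRange 0 ((rows.length : Int) + 1) 1).foldl
      (fun m _ => m ++ [(PySem.List.pyRange 0 ((cols.length : Int) + 1) 1).foldl
              (fun s _ => s ++ ["0"]) ([] : List String)]) ([] : List (List String))
      = List.replicate (rows.length + 1) (List.replicate (cols.length + 1) "0") := by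
    rw [foldl_append_const, hrow, PySem.List.length_pyRange_one]
    rw [show (((rows.length : Int) + 1) - 0).toNat = rows.length + 1 by omega]
    simp
  simp only [get_back]
  rw [hmat]
  rw [show List.replicate (rows.length + 1) (List.replicate (cols.length + 1) "0")
        = (List.replicate (cols.length + 1) "0")
            :: List.replicate rows.length (List.replicate (cols.length + 1) "0") from
      List.replicate_succ ..]
  rw [foldl_set_head]
  rw [show List.replicate (cols.length + 1) ("0" : String)
        = ("0" : String) :: (List.replicate cols.length "0" ++ []) by
      simp [List.replicate_succ]]
  rw [fill_row]
  rw [show List.replicate rows.length (("0" : String) :: (List.replicate cols.length "0" ++ []))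
        = List.replicate rows.length (("0" : String) :: (List.replicate cols.length "0" ++ [])) ++ ([] : List (List String)) by simp]
  rw [fill_col]
  have hset0 : PySem.List.pySetD (("0" : String) :: (List.replicate cols.length "0" ++ [])) 0 "u"
      = "u" :: List.replicate cols.length "0" := by
    simp [PySem.List.pySetD, PySem.List.pySet?, PySem.List.pyIdx?]
  rw [hset0]
  simp [PySem.List.pyGetD, PySem.List.pyGet?, PySem.List.pyIdx?,
        PySem.List.pySetD, PySem.List.pySet?]

-- zipping a first column against m identical columns = zipWith against one column
theorem pyZipStar_replicate (f g : List String) (h : g.length = f.length) (m : Nat) :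
    pyZipStar f (List.replicate m g)
      = List.zipWith (fun a b => a :: List.replicate m b) f g := by
  induction f generalizing g with
  | nil => cases g with
      | nil => rfl
      | cons y yt => simp at h
  | cons x xt ih =>
      cases g with
      | nil => simp at h
      | cons y yt =>
          simp only [pyZipStar]
          rw [if_pos (by simp)]
          have h1 : (List.replicate m (y :: yt)).map (fun c => c.headD "")
              = List.replicate m y := by simp
          have h2 : (List.replicate m (y :: yt)).map List.tail
              = List.replicate m yt := by simp
          rw [h1, h2, ih yt (by simpa using h)]
          rfl

-- zipWith of two replicates of equal length
theorem zipWith_replicate_rep (m n : Nat) :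
    List.zipWith (fun (a b : String) => a :: List.replicate m b)
        (List.replicate n "u") (List.replicate n "0")
      = List.replicate n ("u" :: List.replicate m "0") := by
  induction n with
  | zero => rfl
  | succ n ih => simp [List.replicate_succ, ih]

-- closed form of port B
theorem get_back_alt_closed (rows cols : List String) :
    get_back_alt rows cols
    = ("finish" :: List.replicate cols.length "l")
        :: List.replicate rows.length ("u" :: List.replicate cols.length "0") := by
  unfold get_back_alt
  rw [show cols.map (fun _ => ("l" : String) :: List.replicate rows.length "0")
        = List.replicate cols.length ("l" :: List.replicate rows.length "0") by
      simp [List.map_const']]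
  rw [pyZipStar_replicate _ _ (by simp)]
  simp only [List.zipWith_cons_cons, zipWith_replicate_rep]

-- ===== VERDICT (by name: the statement is the Claim_ definition above) =====
theorem get_back_spec : Claim_equal_get_back := by
  intro rows cols _
  unfold Spec_get_back
  rw [get_back_closed, get_back_alt_closed]
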